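-- pv_equiv track=rewrite | github.com/zidel/solar_panels | train.py | apply_rotation
-- ===== SOURCE A (Python) =====
-- def apply_rotation(tiles, add_up_to=-1):
--     output = list(tiles)
--     for tile in tiles:
--         for rotations in range(1, 4):
--             if add_up_to == 0:
--                 return output
--
--             copy = list(tile)
--             copy[2] = str(rotations)
--             output.append(tuple(copy))
--
--             add_up_to -= 1
--
--     return output
-- ===== SOURCE B (Python) =====
-- def apply_rotation(tiles, add_up_to=-1):
--     total = 3 * len(tiles)
--     n = total if add_up_to < 0 else min(add_up_to, total)
--
--     def rot(k):
--         copy = list(tiles[k // 3])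
--         copy[2] = str(k % 3 + 1)
--         return tuple(copy)
--
--     return list(tiles) + [rot(k) for k in range(n)]
-- ===== Notes on version B (the rewrite author's own statement) =====
-- stated objective: simpler
-- what changed: Replaced A's nested loops with a decrementing counter and a mid-loop early return by computing the number of rotated copies up front (min(add_up_to, 3*len(tiles)), unlimited when negative) and building them by flat index arithmetic: rotation k comes from tiles[k//3] with rotation digit k%3+1.
import Mathlib
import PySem

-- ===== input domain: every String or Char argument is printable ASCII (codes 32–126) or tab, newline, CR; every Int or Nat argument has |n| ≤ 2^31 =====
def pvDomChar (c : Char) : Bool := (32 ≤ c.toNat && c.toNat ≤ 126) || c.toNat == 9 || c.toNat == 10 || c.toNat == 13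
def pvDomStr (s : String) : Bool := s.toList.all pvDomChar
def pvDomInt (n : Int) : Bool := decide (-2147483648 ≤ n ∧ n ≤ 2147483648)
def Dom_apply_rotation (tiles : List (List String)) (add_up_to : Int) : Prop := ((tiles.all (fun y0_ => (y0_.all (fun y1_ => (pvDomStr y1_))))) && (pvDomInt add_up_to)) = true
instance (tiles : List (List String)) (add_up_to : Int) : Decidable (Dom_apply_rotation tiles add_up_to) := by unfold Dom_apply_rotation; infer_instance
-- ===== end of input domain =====

-- B removes A's decrementing counter and mid-loop early return: it computes the number of
-- rotated copies up front and builds them by flat index arithmetic (k//3 picks the tile,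
-- k%3+1 the rotation).  Objective: simpler.  Equivalence is on return values; neither
-- program mutates its arguments.

-- ===== PORT A =====
-- inner 'for rotations in range(1, 4)' loop; Sum.inl = the early 'return output'.
-- 'copy[2] = str(rotations)' raises IndexError when the tile has < 3 entries: that input
-- is excluded by Pre_; pySetD is its total form (exact whenever the index is in range).
def pvInnerA (tile : List String) : List Int → Int → List (List String) → (List (List String)) ⊕ (List (List String) × Int)
  | [], cnt, out => Sum.inr (out, cnt)
  | r :: rs, cnt, out =>
    if cnt = 0 then Sum.inl out
    else pvInnerA tile rs (cnt - 1) (out ++ [PySem.List.pySetD tile 2 (PySem.Int.toStr r)])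

-- outer 'for tile in tiles' loop
def pvOuterA : List (List String) → Int → List (List String) → List (List String)
  | [], _, out => out
  | t :: ts, cnt, out =>
    match pvInnerA t (PySem.List.pyRange 1 4 1) cnt out with
    | Sum.inl o => o
    | Sum.inr (o, c) => pvOuterA ts c o

def apply_rotation (tiles : List (List String)) (add_up_to : Int) : List (List String) :=
  pvOuterA tiles add_up_to tiles

-- ===== PORT B =====
-- rot(k): tiles[k // 3] with copy[2] = str(k % 3 + 1); always in range for k < n ≤ 3*len(tiles)
def pvRotB (tiles : List (List String)) (k : Int) : List String :=
  PySem.List.pySetD (PySem.List.pyGetD tiles (PySem.Int.floordiv k 3) [])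
    2 (PySem.Int.toStr (PySem.Int.mod k 3 + 1))

def apply_rotation_alt (tiles : List (List String)) (add_up_to : Int) : List (List String) :=
  let total : Int := 3 * tiles.length
  let n : Int := if add_up_to < 0 then total else min add_up_to total
  tiles ++ (PySem.List.pyRange 0 n 1).map (pvRotB tiles)

-- ===== PRECONDITION & SPEC =====
-- Pre_ excludes exactly the inputs where Python A raises IndexError: a tile with fewer
-- than 3 entries that the loop actually reaches (i.e. the cap has not stopped it first).
def Pre_apply_rotation (tiles : List (List String)) (add_up_to : Int) : Prop :=
  ∀ i : Nat, i < tiles.length → (tiles.getD i []).length < 3 →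
    (0 ≤ add_up_to ∧ add_up_to ≤ 3 * (i : Int))
instance (tiles : List (List String)) (add_up_to : Int) : Decidable (Pre_apply_rotation tiles add_up_to) := by unfold Pre_apply_rotation; infer_instance

def pvWitness_apply_rotation : List (List String) × Int := ([["a", "b", "c"], ["x", "y", "z"]], -1)

def Spec_apply_rotation (tiles : List (List String)) (add_up_to : Int) (out : List (List String)) : Prop := out = apply_rotation_alt tiles add_up_to
instance (tiles : List (List String)) (add_up_to : Int) (out : List (List String)) : Decidable (Spec_apply_rotation tiles add_up_to out) := by unfold Spec_apply_rotation; infer_instance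

-- ===== CLAIM (what is proved, stated in full; the proofs are below) =====
def Claim_equal_apply_rotation : Prop := ∀ (tiles : List (List String)) (add_up_to : Int), Dom_apply_rotation tiles add_up_to → Pre_apply_rotation tiles add_up_to → Spec_apply_rotation tiles add_up_to (apply_rotation tiles add_up_to)

-- ===== LEMMAS AND PROOFS =====

-- the capped number of rotated copies produced from tiles ts under counter c
def pvN (ts : List (List String)) (c : Int) : Int :=
  if c < 0 then 3 * ts.length else min c (3 * ts.length)

lemma pvInnerA_spec (t : List String) (c : Int) (out : List (List String)) :
    pvInnerA t [1, 2, 3] c out =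
      if c = 0 then Sum.inl out
      else if c = 1 then Sum.inl (out ++ [PySem.List.pySetD t 2 (PySem.Int.toStr 1)])
      else if c = 2 then Sum.inl (out ++ [PySem.List.pySetD t 2 (PySem.Int.toStr 1),
                                          PySem.List.pySetD t 2 (PySem.Int.toStr 2)])
      else Sum.inr (out ++ [PySem.List.pySetD t 2 (PySem.Int.toStr 1),
                            PySem.List.pySetD t 2 (PySem.Int.toStr 2),
                            PySem.List.pySetD t 2 (PySem.Int.toStr 3)], c - 3) := by
  by_cases h0 : c = 0
  · simp [pvInnerA, h0]
  by_cases h1 : c = 1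
  · simp [pvInnerA, h1]
  by_cases h2 : c = 2
  · subst h2; norm_num [pvInnerA]
  · have h10 : c - 1 ≠ 0 := by omega
    have h20 : c - 1 - 1 ≠ 0 := by omega
    simp [pvInnerA, h0, h10, h20, h1, h2, List.append_assoc]
    omega

lemma pvRotB_nat (tiles : List (List String)) (k : Nat) :
    pvRotB tiles (k : Int) =
      PySem.List.pySetD (tiles.getD (k / 3) []) 2 (PySem.Int.toStr ((k % 3 + 1 : Nat) : Int)) := by
  unfold pvRotB
  rw [show (3 : Int) = ((3 : Nat) : Int) from rfl, PySem.Int.floordiv_natCast,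
     PySem.Int.mod_natCast, PySem.List.pyGetD_natCast]
  congr 1

lemma pvRotB_shift (t : List String) (ts : List (List String)) (k : Nat) :
    pvRotB (t :: ts) ((3 : Int) + (k : Int)) = pvRotB ts ((0 : Int) + (k : Int)) := by
  rw [show ((3 : Int) + (k : Int)) = (((3 + k : Nat) : Int)) by push_cast; ring,
     show ((0 : Int) + (k : Int)) = ((k : Nat) : Int) by ring,
     pvRotB_nat, pvRotB_nat]
  have hd : (3 + k) / 3 = k / 3 + 1 := by omega
  have hm : (3 + k) % 3 = k % 3 := by omega
  rw [hd, hm]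
  rfl

lemma pvRotB_zero (t : List String) (ts : List (List String)) :
    pvRotB (t :: ts) 0 = PySem.List.pySetD t 2 (PySem.Int.toStr 1) := by
  rw [show (0 : Int) = ((0 : Nat) : Int) from rfl, pvRotB_nat]; rfl

lemma pvRotB_one (t : List String) (ts : List (List String)) :
    pvRotB (t :: ts) 1 = PySem.List.pySetD t 2 (PySem.Int.toStr 2) := by
  rw [show (1 : Int) = ((1 : Nat) : Int) from rfl, pvRotB_nat]; rfl

lemma pvRotB_two (t : List String) (ts : List (List String)) :
    pvRotB (t :: ts) 2 = PySem.List.pySetD t 2 (PySem.Int.toStr 3) := by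
  rw [show (2 : Int) = ((2 : Nat) : Int) from rfl, pvRotB_nat]; rfl

lemma pvOuterA_eq (ts : List (List String)) :
    ∀ (c : Int) (out : List (List String)),
      pvOuterA ts c out = out ++ (PySem.List.pyRange 0 (pvN ts c) 1).map (pvRotB ts) := by
  induction ts with
  | nil =>
    intro c out
    have h : pvN [] c = 0 := by simp [pvN]
    simp [pvOuterA, h, PySem.List.pyRange_one_eq_nil (le_refl (0 : Int))]
  | cons t ts ih =>
    intro c out
    have hrange : PySem.List.pyRange 1 4 1 = [1, 2, 3] := by decide
    rw [pvOuterA, hrange, pvInnerA_spec]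
    by_cases h0 : c = 0
    · subst h0
      have hN : pvN (t :: ts) 0 = 0 := by simp only [pvN, List.length_cons]; split <;> omega
      simp [hN, PySem.List.pyRange_one_eq_nil (le_refl (0 : Int))]
    by_cases h1 : c = 1
    · subst h1
      have hN : pvN (t :: ts) 1 = 1 := by simp only [pvN, List.length_cons]; split <;> omega
      have hr : PySem.List.pyRange 0 (1 : Int) 1 = [0] := by decide
      simp [h0, hN, hr, pvRotB_zero]
    by_cases h2 : c = 2
    · subst h2
      have hN : pvN (t :: ts) 2 = 2 := by simp only [pvN, List.length_cons]; split <;> omega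
      have hr : PySem.List.pyRange 0 (2 : Int) 1 = [0, 1] := by decide
      simp [h0, h1, hN, hr, pvRotB_zero, pvRotB_one]
    · -- counter is negative (unlimited) or ≥ 3: the whole tile is rotated, recurse
      have h3 : 3 ≤ pvN (t :: ts) c := by simp only [pvN, List.length_cons]; split <;> omega
      have hrec : pvN ts (c - 3) = pvN (t :: ts) c - 3 := by
        simp only [pvN, List.length_cons]; split <;> split <;> omega
      simp only [h0, h1, h2, if_false]
      rw [ih, hrec,
         PySem.List.pyRange_one_append 0 3 (pvN (t :: ts) c) (by omega) h3,
         List.map_append,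
         show PySem.List.pyRange 0 3 1 = [0, 1, 2] from by decide]
      simp only [List.map_cons, List.map_nil, pvRotB_zero, pvRotB_one, pvRotB_two,
        List.append_assoc, List.cons_append, List.nil_append]
      congr 2
      rw [PySem.List.pyRange_one (a := 3), PySem.List.pyRange_one (a := 0),
         List.map_map, List.map_map]
      have hlen : (pvN (t :: ts) c - 3 - 0).toNat = (pvN (t :: ts) c - 3).toNat := by omega
      rw [hlen]
      simp only [Function.comp_def]
      have hmap : List.map (fun k : Nat => pvRotB (t :: ts) ((3 : Int) + (k : Int)))
            (List.range (pvN (t :: ts) c - 3).toNat)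
          = List.map (fun k : Nat => pvRotB ts ((0 : Int) + (k : Int)))
            (List.range (pvN (t :: ts) c - 3).toNat) :=
        List.map_congr_left (fun k _ => pvRotB_shift t ts k)
      rw [hmap]

-- ===== VERDICT (by name: the statement is the Claim_ definition above) =====
theorem apply_rotation_spec : Claim_equal_apply_rotation := by
  intro tiles add_up_to _ _
  unfold Spec_apply_rotation apply_rotation apply_rotation_alt
  rw [pvOuterA_eq]
  rfl
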